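-- pv_equiv track=rewrite | github.com/jgoliszewski/GoliszewskiJakub-MaturyPR | zbior zadan cke/78 - python/zadanit78.py | skrot
-- ===== SOURCE A (Python) =====
-- def skrot(wiad):
-- 	S = []
-- 	for l in "ALGORYTM":
-- 		S.append(ord(l))
-- 	x = len(wiad) % 8
-- 	if x != 0:
-- 		for x in range(8-x):
-- 			wiad += '.'
-- 	dl = len(wiad)
-- 	tab_wiad = []
-- 	while wiad != '':
-- 		tab_wiad.append(wiad[0:8])
-- 		wiad = wiad[8:]
--
-- 	for p in tab_wiad:
-- 		for j in range(8):
-- 			S[j] = (S[j] + ord(p[j])) % 128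
-- 	wynik = ""
-- 	for j in range(8):
-- 		wynik += chr(65 + (S[j] % 26))
-- 	return wynik, dl, S
-- ===== SOURCE B (Python) =====
-- def skrot(wiad):
--     pad = (-len(wiad)) % 8
--     wiad += '.' * pad
--     dl = len(wiad)
--     S = [(ord(k) + sum(ord(wiad[i]) for i in range(j, dl, 8))) % 128
--          for j, k in enumerate("ALGORYTM")]
--     wynik = "".join(chr(65 + s % 26) for s in S)
--     return wynik, dl, S
-- ===== Notes on version B (the rewrite author's own statement) =====
-- stated objective: faster
-- what changed: B drops the reshape-into-8-char-blocks while-loop (whose repeated wiad = wiad[8:] copies make A quadratic) and the per-block nested update: it pads in one arithmetic step ((-len)%8 dots) and computes each of the 8 checksum entries by a single strided column sum with one final mod, building the result string with a join.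
import Mathlib
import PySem

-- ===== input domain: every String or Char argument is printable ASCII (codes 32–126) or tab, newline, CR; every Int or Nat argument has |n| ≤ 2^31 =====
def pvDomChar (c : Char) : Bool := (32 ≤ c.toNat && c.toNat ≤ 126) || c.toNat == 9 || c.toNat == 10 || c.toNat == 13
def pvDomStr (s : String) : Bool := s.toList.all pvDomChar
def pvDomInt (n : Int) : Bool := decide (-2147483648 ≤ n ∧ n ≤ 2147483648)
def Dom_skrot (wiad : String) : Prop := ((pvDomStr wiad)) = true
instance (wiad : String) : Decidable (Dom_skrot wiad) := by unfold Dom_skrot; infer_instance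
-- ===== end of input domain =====

-- B replaces A's reshape-into-8-char-blocks + nested per-block update (quadratic from repeated
-- wiad = wiad[8:] copies) with arithmetic padding and one strided column sum per checksum entry
-- (objective: faster; measured).

-- ===== PORT A =====
-- the while loop collecting 8-char slices (wiad[0:8] pushed, wiad = wiad[8:])
def skrotChunks (w : List Char) : List (List Char) :=
  if h : w = [] then []
  else PySem.List.slice w (some 0) (some 8) :: skrotChunks (PySem.List.slice w (some 8) none)
termination_by w.length
decreasing_by
  rw [PySem.List.slice_from w (by norm_num : (0:Int) ≤ 8)]
  have : w.length ≠ 0 := fun hl => h (List.eq_nil_of_length_eq_zero hl)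
  simp only [List.length_drop]; omega

def skrot (wiad : String) : String × Int × List Int :=
  let S : List Int := "ALGORYTM".toList.foldl (fun S l => S ++ [((l.toNat : Int))]) []
  let w := wiad.toList
  let x := PySem.Int.mod (w.length : Int) 8
  let w := if x ≠ 0 then (PySem.List.pyRange 0 (8 - x) 1).foldl (fun w _ => w ++ ['.']) w else w
  let dl := (w.length : Int)
  let tab := skrotChunks w
  let S := tab.foldl (fun S p =>
    (PySem.List.pyRange 0 8 1).foldl (fun S j =>
      S.set j.toNat (PySem.Int.mod (S.getD j.toNat 0 + ((PySem.List.pyGetD p j ' ').toNat : Int)) 128)) S) S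
  let wynik := (PySem.List.pyRange 0 8 1).foldl
    (fun acc j => acc ++ [Char.ofNat (65 + (PySem.Int.mod (S.getD j.toNat 0) 26)).toNat]) ([] : List Char)
  (String.ofList wynik, dl, S)

-- ===== PORT B =====
def skrot_alt (wiad : String) : String × Int × List Int :=
  let pad := PySem.Int.mod (-(wiad.toList.length : Int)) 8
  let w := wiad.toList ++ List.replicate pad.toNat '.'
  let dl := (w.length : Int)
  let S := (PySem.List.enumerate "ALGORYTM".toList 0).map (fun jk =>
    PySem.Int.mod (((jk.2.toNat : Int)) +
      (PySem.List.pyRange jk.1 dl 8).foldl (fun acc i => acc + ((PySem.List.pyGetD w i ' ').toNat : Int)) 0) 128)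
  let wynik := String.ofList (S.map (fun s => Char.ofNat (65 + PySem.Int.mod s 26).toNat))
  (wynik, dl, S)

-- ===== PRECONDITION & SPEC =====
def Spec_skrot (wiad : String) (out : String × Int × List Int) : Prop := out = skrot_alt wiad
instance (wiad : String) (out : String × Int × List Int) : Decidable (Spec_skrot wiad out) := by unfold Spec_skrot; infer_instance

-- ===== CLAIM (what is proved, stated in full; the proofs are below) =====
def Claim_equal_skrot : Prop := ∀ (wiad : String), Dom_skrot wiad → Spec_skrot wiad (skrot wiad)

-- ===== LEMMAS AND PROOFS =====

-- column sum of character codes at positions j, j+8, j+16, …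
def colRec (j : ℕ) (w : List Char) : Int :=
  if h : w = [] then 0
  else ((w.getD j ' ').toNat : Int) + colRec j (w.drop 8)
termination_by w.length
decreasing_by
  have : w.length ≠ 0 := fun hl => h (List.eq_nil_of_length_eq_zero hl)
  simp only [List.length_drop]; omega

theorem pymod_pos (a b : Int) (hb : 0 ≤ b) : PySem.Int.mod a b = a % b := by
  show a.fmod b = a % b
  rw [Int.fmod_eq_emod, if_pos (Or.inl hb), add_zero]

theorem pymod128_eq (a : Int) : PySem.Int.mod a 128 = a % 128 := pymod_pos a 128 (by norm_num)

theorem colRec_nil (j : ℕ) : colRec j [] = 0 := by rw [colRec]; simp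

theorem colRec_cons (j : ℕ) (w : List Char) (hw : w ≠ []) :
    colRec j w = ((w.getD j ' ').toNat : Int) + colRec j (w.drop 8) := by
  rw [colRec]; simp [hw]

theorem mod_step (s x y : Int) :
    PySem.Int.mod (PySem.Int.mod (s + x) 128 + y) 128 = PySem.Int.mod (s + (x + y)) 128 := by
  rw [pymod128_eq, pymod128_eq, pymod128_eq, Int.emod_add_emod]
  ring_nf

theorem mod128_lb (a : Int) : 0 ≤ PySem.Int.mod a 128 := by
  rw [pymod128_eq]; exact Int.emod_nonneg _ (by norm_num)

theorem mod128_ub (a : Int) : PySem.Int.mod a 128 < 128 := by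
  rw [pymod128_eq]; exact Int.emod_lt_of_pos _ (by norm_num)

theorem stepEval (s0 s1 s2 s3 s4 s5 s6 s7 : Int) (p : List Char) (hp : p.length = 8) :
    (PySem.List.pyRange 0 8 1).foldl (fun S j =>
      S.set j.toNat (PySem.Int.mod (S.getD j.toNat 0 + ((PySem.List.pyGetD p j ' ').toNat : Int)) 128))
      [s0,s1,s2,s3,s4,s5,s6,s7]
    = [PySem.Int.mod (s0 + ((p.getD 0 ' ').toNat : Int)) 128,
       PySem.Int.mod (s1 + ((p.getD 1 ' ').toNat : Int)) 128,
       PySem.Int.mod (s2 + ((p.getD 2 ' ').toNat : Int)) 128,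
       PySem.Int.mod (s3 + ((p.getD 3 ' ').toNat : Int)) 128,
       PySem.Int.mod (s4 + ((p.getD 4 ' ').toNat : Int)) 128,
       PySem.Int.mod (s5 + ((p.getD 5 ' ').toNat : Int)) 128,
       PySem.Int.mod (s6 + ((p.getD 6 ' ').toNat : Int)) 128,
       PySem.Int.mod (s7 + ((p.getD 7 ' ').toNat : Int)) 128] := by
  have hr : PySem.List.pyRange 0 8 1 = [0,1,2,3,4,5,6,7] := by decide
  rw [hr]
  simp [List.foldl, List.set, List.getD, PySem.List.pyGetD, PySem.List.pyGet?, PySem.List.pyIdx?, hp]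

theorem chunkFold : ∀ (m : ℕ) (w : List Char), w.length = 8*m →
    ∀ s0 s1 s2 s3 s4 s5 s6 s7 : Int,
    0 ≤ s0 → s0 < 128 → 0 ≤ s1 → s1 < 128 → 0 ≤ s2 → s2 < 128 → 0 ≤ s3 → s3 < 128 →
    0 ≤ s4 → s4 < 128 → 0 ≤ s5 → s5 < 128 → 0 ≤ s6 → s6 < 128 → 0 ≤ s7 → s7 < 128 →
    (skrotChunks w).foldl (fun S p =>
      (PySem.List.pyRange 0 8 1).foldl (fun S j =>
        S.set j.toNat (PySem.Int.mod (S.getD j.toNat 0 + ((PySem.List.pyGetD p j ' ').toNat : Int)) 128)) S)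
      [s0,s1,s2,s3,s4,s5,s6,s7]
    = [PySem.Int.mod (s0 + colRec 0 w) 128, PySem.Int.mod (s1 + colRec 1 w) 128,
       PySem.Int.mod (s2 + colRec 2 w) 128, PySem.Int.mod (s3 + colRec 3 w) 128,
       PySem.Int.mod (s4 + colRec 4 w) 128, PySem.Int.mod (s5 + colRec 5 w) 128,
       PySem.Int.mod (s6 + colRec 6 w) 128, PySem.Int.mod (s7 + colRec 7 w) 128] := by
  intro m
  induction m with
  | zero =>
    intro w hw s0 s1 s2 s3 s4 s5 s6 s7 a0 b0 a1 b1 a2 b2 a3 b3 a4 b4 a5 b5 a6 b6 a7 b7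
    have hwn : w = [] := List.eq_nil_of_length_eq_zero (by omega)
    subst hwn
    have e : ∀ s : Int, 0 ≤ s → s < 128 → PySem.Int.mod s 128 = s := fun s h1 h2 => by
      rw [pymod128_eq]; exact Int.emod_eq_of_lt h1 h2
    rw [skrotChunks]
    simp [colRec_nil]
    omega
  | succ m ih =>
    intro w hw s0 s1 s2 s3 s4 s5 s6 s7 a0 b0 a1 b1 a2 b2 a3 b3 a4 b4 a5 b5 a6 b6 a7 b7
    have hne : w ≠ [] := by intro h; subst h; simp at hw
    obtain ⟨c0,c1,c2,c3,c4,c5,c6,c7,w',rfl⟩ :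
        ∃ c0 c1 c2 c3 c4 c5 c6 c7 w', w = c0::c1::c2::c3::c4::c5::c6::c7::w' := by
      rcases w with _|⟨c0,_|⟨c1,_|⟨c2,_|⟨c3,_|⟨c4,_|⟨c5,_|⟨c6,_|⟨c7,w'⟩⟩⟩⟩⟩⟩⟩⟩ <;>
        first
          | (exfalso; simp only [List.length_cons, List.length_nil] at hw; omega)
          | exact ⟨_,_,_,_,_,_,_,_,_,rfl⟩
    have hw' : w'.length = 8*m := by simp at hw; omega
    have hcol : ∀ j:ℕ, j < 8 → colRec j (c0::c1::c2::c3::c4::c5::c6::c7::w')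
        = (([c0,c1,c2,c3,c4,c5,c6,c7].getD j ' ').toNat : Int) + colRec j w' := by
      intro j hj
      rw [colRec_cons j _ (by simp)]
      interval_cases j <;> simp [List.getD]
    have hs1 : PySem.List.slice (c0::c1::c2::c3::c4::c5::c6::c7::w') (some 0) (some 8)
        = [c0,c1,c2,c3,c4,c5,c6,c7] := by
      rw [PySem.List.slice_zero_start, PySem.List.slice_to _ (by norm_num : (0:Int) ≤ 8)]
      simp [List.take]
    have hs2 : PySem.List.slice (c0::c1::c2::c3::c4::c5::c6::c7::w') (some 8) none = w' := by
      rw [PySem.List.slice_from _ (by norm_num : (0:Int) ≤ 8)]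
      simp
    rw [skrotChunks, dif_neg hne, hs1, hs2, List.foldl_cons,
      stepEval s0 s1 s2 s3 s4 s5 s6 s7 [c0,c1,c2,c3,c4,c5,c6,c7] (by simp),
      ih w' hw' _ _ _ _ _ _ _ _
        (mod128_lb _) (mod128_ub _) (mod128_lb _) (mod128_ub _)
        (mod128_lb _) (mod128_ub _) (mod128_lb _) (mod128_ub _)
        (mod128_lb _) (mod128_ub _) (mod128_lb _) (mod128_ub _)
        (mod128_lb _) (mod128_ub _) (mod128_lb _) (mod128_ub _),
      hcol 0 (by norm_num), hcol 1 (by norm_num), hcol 2 (by norm_num), hcol 3 (by norm_num),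
      hcol 4 (by norm_num), hcol 5 (by norm_num), hcol 6 (by norm_num), hcol 7 (by norm_num)]
    simp only [mod_step]

theorem foldl_pad (t : List Int) : ∀ (l : List Char),
    t.foldl (fun w _ => w ++ ['.']) l = l ++ List.replicate t.length '.' := by
  induction t with
  | nil => simp
  | cons a t ih => intro l; simp [List.foldl, ih, List.replicate_succ]

theorem colSum : ∀ (m : ℕ) (w : List Char), w.length = 8*m → ∀ j : ℕ,
    (((List.range m).map (fun k => (((w.getD (j+8*k) ' ').toNat : Int)))).sum) = colRec j w := by
  intro m
  induction m with
  | zero =>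
    intro w hw j
    have : w = [] := List.eq_nil_of_length_eq_zero (by omega)
    subst this; simp [colRec_nil]
  | succ m ih =>
    intro w hw j
    have hne : w ≠ [] := by intro h; subst h; simp at hw
    rw [List.range_succ_eq_map]
    simp only [List.map_cons, List.map_map, List.sum_cons]
    have hdrop : ∀ k : ℕ, w.getD (j+8*(Nat.succ k)) ' ' = (w.drop 8).getD (j+8*k) ' ' := by
      intro k
      have h : j + 8*(Nat.succ k) = 8 + (j + 8*k) := by omega
      simp only [List.getD, List.getElem?_drop, h]
    have hmap : ((List.range m).map (fun k => (((w.getD (j+8*(Nat.succ k)) ' ').toNat : Int))))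
        = ((List.range m).map (fun k => ((((w.drop 8).getD (j+8*k) ' ').toNat : Int)))) := by
      refine List.map_congr_left ?_
      intro k _; rw [hdrop]
    have hlen' : (w.drop 8).length = 8*m := by simp [List.length_drop]; omega
    calc ((w.getD (j+8*0) ' ').toNat : Int)
          + (((List.range m).map (fun k => (((w.getD (j+8*(Nat.succ k)) ' ').toNat : Int)))).sum)
        = ((w.getD j ' ').toNat : Int) + colRec j (w.drop 8) := by
          rw [hmap, ih (w.drop 8) hlen' j]; norm_num
      _ = colRec j w := (colRec_cons j w hne).symm

theorem strideFold (m : ℕ) (w : List Char) (hw : w.length = 8*m) (j : ℕ) (hj : j < 8) :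
    (PySem.List.pyRange (j : Int) ((w.length : Int)) 8).foldl
      (fun acc i => acc + ((PySem.List.pyGetD w i ' ').toNat : Int)) 0
    = colRec j w := by
  rw [PySem.List.pyRange_of_pos _ _ (by norm_num)]
  have h8 : ((j:Int)) < 8 := by exact_mod_cast hj
  have h0 : (0:Int) ≤ (j:Int) := by positivity
  have hK : (if (j:Int) < (w.length:Int) then (((w.length:Int) - j + 8 - 1)/8).toNat else 0) = m := by
    rw [hw]; push_cast; split_ifs with h <;> omega
  rw [hK, List.foldl_map, PySem.List.foldl_add, zero_add]
  have hidx : ∀ k : ℕ, PySem.List.pyGetD w ((j:Int) + 8*(k:Int)) ' ' = w.getD (j+8*k) ' ' := by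
    intro k
    have := PySem.List.pyGetD_natCast w (j+8*k) ' '
    push_cast at this
    exact this
  have hmap : (List.map (fun y : ℕ => ((PySem.List.pyGetD w ((j:Int) + 8 * (y:Int)) ' ').toNat : Int)) (List.range m))
      = List.map (fun k => (((w.getD (j+8*k) ' ').toNat : Int))) (List.range m) :=
    List.map_congr_left (fun k _ => by rw [hidx k])
  rw [hmap, colSum m w hw j]

theorem skrot_spec : Claim_equal_skrot := by
  unfold Claim_equal_skrot Spec_skrot
  intro wiad _
  simp only [skrot, skrot_alt]
  have hpad : (if PySem.Int.mod ((wiad.toList.length : ℕ) : Int) 8 ≠ 0 then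
        List.foldl (fun w _ => w ++ ['.']) wiad.toList
          (PySem.List.pyRange 0 (8 - PySem.Int.mod ((wiad.toList.length : ℕ) : Int) 8) 1)
      else wiad.toList)
      = wiad.toList ++ List.replicate (PySem.Int.mod (-((wiad.toList.length : ℕ) : Int)) 8).toNat '.' := by
    have hmodn := pymod_pos ((wiad.toList.length : ℕ) : Int) 8 (by norm_num)
    have hmodneg := pymod_pos (-((wiad.toList.length : ℕ) : Int)) 8 (by norm_num)
    split_ifs with h
    · rw [foldl_pad]
      have hcount : (PySem.List.pyRange 0 (8 - PySem.Int.mod ((wiad.toList.length : ℕ) : Int) 8) 1).length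
          = (PySem.Int.mod (-((wiad.toList.length : ℕ) : Int)) 8).toNat := by
        rw [PySem.List.length_pyRange_one, hmodn, hmodneg]
        rw [hmodn] at h
        omega
      rw [hcount]
    · rw [hmodn] at h
      have hz : PySem.Int.mod (-((wiad.toList.length : ℕ) : Int)) 8 = 0 := by
        rw [hmodneg]; omega
      rw [hz]
      simp
  rw [hpad]
  have hm8 : ∃ m : ℕ, (wiad.toList ++ List.replicate (PySem.Int.mod (-((wiad.toList.length : ℕ) : Int)) 8).toNat '.').length = 8*m := by
    refine ⟨(wiad.toList.length + (PySem.Int.mod (-((wiad.toList.length : ℕ) : Int)) 8).toNat)/8, ?_⟩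
    simp only [List.length_append, List.length_replicate]
    rw [pymod_pos _ _ (by norm_num)]
    omega
  obtain ⟨m, hm⟩ := hm8
  generalize hgen : wiad.toList ++ List.replicate (PySem.Int.mod (-((wiad.toList.length : ℕ) : Int)) 8).toNat '.' = P at hm ⊢
  have hS0 : List.foldl (fun S l => S ++ [((l.toNat : ℕ) : Int)]) [] "ALGORYTM".toList
      = [(('A'.toNat : ℕ) : Int), (('L'.toNat : ℕ) : Int), (('G'.toNat : ℕ) : Int), (('O'.toNat : ℕ) : Int),
         (('R'.toNat : ℕ) : Int), (('Y'.toNat : ℕ) : Int), (('T'.toNat : ℕ) : Int), (('M'.toNat : ℕ) : Int)] := by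
    decide
  rw [hS0]
  rw [chunkFold m P hm _ _ _ _ _ _ _ _
    (by decide) (by decide) (by decide) (by decide) (by decide) (by decide) (by decide) (by decide)
    (by decide) (by decide) (by decide) (by decide) (by decide) (by decide) (by decide) (by decide)]
  have hen : PySem.List.enumerate "ALGORYTM".toList 0
      = [(0,'A'),(1,'L'),(2,'G'),(3,'O'),(4,'R'),(5,'Y'),(6,'T'),(7,'M')] := by decide
  rw [hen]
  simp only [List.map_cons, List.map_nil]
  have t0 := strideFold m P hm 0 (by norm_num); push_cast at t0
  have t1 := strideFold m P hm 1 (by norm_num); push_cast at t1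
  have t2 := strideFold m P hm 2 (by norm_num); push_cast at t2
  have t3 := strideFold m P hm 3 (by norm_num); push_cast at t3
  have t4 := strideFold m P hm 4 (by norm_num); push_cast at t4
  have t5 := strideFold m P hm 5 (by norm_num); push_cast at t5
  have t6 := strideFold m P hm 6 (by norm_num); push_cast at t6
  have t7 := strideFold m P hm 7 (by norm_num); push_cast at t7
  rw [t0, t1, t2, t3, t4, t5, t6, t7]
  have hr : PySem.List.pyRange 0 8 1 = [0,1,2,3,4,5,6,7] := by decide
  rw [hr]
  simp [List.foldl, List.getD]
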